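-- pv_equiv track=rewrite | github.com/BockF/httk | src/httk/iface/vasp_if.py | get_magnetizations
-- ===== SOURCE A (Python) =====
-- magions = ['Ag', 'Au', 'Cd', 'Ce', 'Co', 'Cr', 'Cu', 'Dy', 'Er', 'Eu', 'Fe', 'Gd', 'Hf', 'Hg', 'Ho', 'Ir', 'La', 'Lu', 'Mn', 'Mo', 'Nb', 'Nd', 'Ni', 'Os', 'Pa', 'Pd', 'Pm', 'Pr', 'Pt', 'Re', 'Rh', 'Ru', 'Sc', 'Sm', 'Ta', 'Tb', 'Tc', 'Th', 'Ti', 'Tm', 'U', 'V', 'W', 'Y', 'Yb', 'Zn', 'Zr']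
--
-- dualmag = {'O': ['Co'], 'S': ['Mn', 'Fe', 'Cr', 'Co']}
--
-- def is_dualmagnetic(ion, ionlist):
--     for i in range(len(ionlist)):
--         if ionlist[i] in dualmag:
--             if ion in dualmag[ionlist[i]]:
--                 return True
--     return False
--
-- def magnetization_recurse(basemags, dualmags, high, low):
--     if len(dualmags) == 0:
--         return [basemags]
--
--     index = dualmags.pop()
--     basemags[index] = high
--     hi_list = magnetization_recurse(list(basemags), list(dualmags), high, low)
--     basemags[index] = low
--     low_list = magnetization_recurse(list(basemags), list(dualmags), high, low)
--
--     return hi_list + low_list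
--
-- def get_magnetizations(ionlist, high, low):
--     basemags = []
--     dualmags = []
--     for i in range(len(ionlist)):
--         if is_dualmagnetic(ionlist[i], ionlist):
--             basemags.append(None)
--             dualmags.append(i)
--         else:
--             if ionlist[i] in magions:
--                 basemags.append(high)
--             else:
--                 basemags.append(low)
--
--     return magnetization_recurse(basemags, dualmags, high, low)
-- ===== SOURCE B (Python) =====
-- magions = ['Ag', 'Au', 'Cd', 'Ce', 'Co', 'Cr', 'Cu', 'Dy', 'Er', 'Eu', 'Fe', 'Gd', 'Hf', 'Hg', 'Ho', 'Ir', 'La', 'Lu', 'Mn', 'Mo', 'Nb', 'Nd', 'Ni', 'Os', 'Pa', 'Pd', 'Pm', 'Pr', 'Pt', 'Re', 'Rh', 'Ru', 'Sc', 'Sm', 'Ta', 'Tb', 'Tc', 'Th', 'Ti', 'Tm', 'U', 'V', 'W', 'Y', 'Yb', 'Zn', 'Zr']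
--
-- dualmag = {'O': ['Co'], 'S': ['Mn', 'Fe', 'Cr', 'Co']}
--
-- def get_magnetizations(ionlist, high, low):
--     # which ions are dual-magnetic in this list: precompute once
--     active = set()
--     for key, ions in dualmag.items():
--         if key in ionlist:
--             active.update(ions)
--     basemags = []
--     dualmags = []
--     for i, ion in enumerate(ionlist):
--         if ion in active:
--             basemags.append(None)
--             dualmags.append(i)
--         elif ion in magions:
--             basemags.append(high)
--         else:
--             basemags.append(low)
--     # enumerate all 2^k assignments by binary counting:
--     # dualmags[0] is the fastest-varying position, bit 0 = high first
--     results = []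
--     for n in range(2 ** len(dualmags)):
--         mags = list(basemags)
--         q = n
--         for pos in dualmags:
--             q, r = divmod(q, 2)
--             mags[pos] = low if r else high
--         results.append(mags)
--     return results
-- ===== Notes on version B (the rewrite author's own statement) =====
-- stated objective: faster
-- what changed: B precomputes the set of dual-magnetic ions once instead of A's per-element rescan of ionlist (O(n^2) -> O(n)), and replaces A's recursive pop/copy enumeration of high/low assignments by an iterative binary count over range(2**k) with a divmod bit-decoding loop (dualmags[0] = least-significant bit, 0 = high), producing the same lists in the same order.
import Mathlib
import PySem

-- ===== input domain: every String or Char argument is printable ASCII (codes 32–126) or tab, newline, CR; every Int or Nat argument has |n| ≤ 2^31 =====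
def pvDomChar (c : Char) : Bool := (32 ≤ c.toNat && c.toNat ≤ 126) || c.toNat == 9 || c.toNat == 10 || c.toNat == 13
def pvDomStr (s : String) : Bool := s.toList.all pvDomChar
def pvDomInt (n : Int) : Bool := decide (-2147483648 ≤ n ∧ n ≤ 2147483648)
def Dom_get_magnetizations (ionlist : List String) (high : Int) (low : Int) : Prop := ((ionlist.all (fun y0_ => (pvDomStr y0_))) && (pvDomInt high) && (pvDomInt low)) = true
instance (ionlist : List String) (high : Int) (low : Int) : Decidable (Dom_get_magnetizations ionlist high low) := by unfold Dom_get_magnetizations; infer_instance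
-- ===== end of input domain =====

-- B precomputes the active dual-magnetic ion set once (A rescans ionlist per element) and
-- enumerates the high/low assignments by an iterative binary count instead of A's recursion;
-- same output in the same order, measurably faster on long ion lists.


-- ===== PORT A =====
def pvMagions : List String := ["Ag", "Au", "Cd", "Ce", "Co", "Cr", "Cu", "Dy", "Er", "Eu", "Fe", "Gd", "Hf", "Hg", "Ho", "Ir", "La", "Lu", "Mn", "Mo", "Nb", "Nd", "Ni", "Os", "Pa", "Pd", "Pm", "Pr", "Pt", "Re", "Rh", "Ru", "Sc", "Sm", "Ta", "Tb", "Tc", "Th", "Ti", "Tm", "U", "V", "W", "Y", "Yb", "Zn", "Zr"]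

def pvDualmag : PySem.Dict String (List String) := PySem.Dict.ofList [("O", ["Co"]), ("S", ["Mn", "Fe", "Cr", "Co"])]

-- 'for i in range(len(ionlist)): if ionlist[i] in dualmag: if ion in dualmag[ionlist[i]]: return True'
def is_dualmagnetic (ion : String) (ionlist : List String) : Bool :=
  ionlist.any (fun k =>
    match pvDualmag.get? k with
    | some lst => lst.contains ion
    | none => false)

-- 'index = dualmags.pop()' = last element; list indices are Nat (from range(len)), always in range
def magnetization_recurse (basemags : List (Option Int)) (dualmags : List Nat) (high : Int) (low : Int) : List (List (Option Int)) :=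
  if hd : dualmags = [] then [basemags]
  else
    let index := dualmags.getLast hd
    let rest := dualmags.dropLast
    let b1 := basemags.set index (some high)
    magnetization_recurse b1 rest high low ++
      magnetization_recurse (b1.set index (some low)) rest high low
termination_by dualmags.length
decreasing_by
  all_goals
    simp only [List.length_dropLast]
    exact Nat.sub_lt (List.length_pos_of_ne_nil hd) Nat.one_pos

def get_magnetizations (ionlist : List String) (high : Int) (low : Int) : List (List (Option Int)) :=
  let st := (ionlist.zipIdx).foldl
    (fun (acc : List (Option Int) × List Nat) p =>
      if is_dualmagnetic p.1 ionlist then (acc.1 ++ [none], acc.2 ++ [p.2])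
      else if pvMagions.contains p.1 then (acc.1 ++ [some high], acc.2)
      else (acc.1 ++ [some low], acc.2))
    ([], [])
  magnetization_recurse st.1 st.2 high low

-- ===== PORT B =====
def get_magnetizations_alt (ionlist : List String) (high : Int) (low : Int) : List (List (Option Int)) :=
  -- active = set(); for key, ions in dualmag.items(): if key in ionlist: active.update(ions)
  let active : PySem.Set String :=
    pvDualmag.items.foldl
      (fun (s : PySem.Set String) kv =>
        if ionlist.contains kv.1 then kv.2.foldl PySem.Set.add s else s)
      []
  let st := (ionlist.zipIdx).foldl
    (fun (acc : List (Option Int) × List Nat) p =>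
      if active.contains p.1 then (acc.1 ++ [none], acc.2 ++ [p.2])
      else if pvMagions.contains p.1 then (acc.1 ++ [some high], acc.2)
      else (acc.1 ++ [some low], acc.2))
    ([], [])
  -- for n in range(2**k): copy basemags; q,r = divmod(q,2) along dualmags
  (List.range (2 ^ st.2.length)).map (fun n =>
    (st.2.foldl
      (fun (m : List (Option Int) × Nat) pos =>
        (m.1.set pos (some (if m.2 % 2 = 1 then low else high)), m.2 / 2))
      (st.1, n)).1)

-- ===== PRECONDITION & SPEC =====
def Spec_get_magnetizations (ionlist : List String) (high : Int) (low : Int) (out : List (List (Option Int))) : Prop := out = get_magnetizations_alt ionlist high low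
instance (ionlist : List String) (high : Int) (low : Int) (out : List (List (Option Int))) : Decidable (Spec_get_magnetizations ionlist high low out) := by unfold Spec_get_magnetizations; infer_instance

-- ===== CLAIM (what is proved, stated in full; the proofs are below) =====
def Claim_equal_get_magnetizations : Prop := ∀ (ionlist : List String) (high : Int) (low : Int), Dom_get_magnetizations ionlist high low → Spec_get_magnetizations ionlist high low (get_magnetizations ionlist high low)

-- ===== LEMMAS AND PROOFS =====

-- B's inner divmod loop, named for the proofs
def pvAssign (high low : Int) (b : List (Option Int)) (d : List Nat) (n : Nat) : List (Option Int) :=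
  (d.foldl
    (fun (m : List (Option Int) × Nat) pos =>
      (m.1.set pos (some (if m.2 % 2 = 1 then low else high)), m.2 / 2))
    (b, n)).1

theorem pvAssign_nil (high low : Int) (b : List (Option Int)) (n : Nat) :
    pvAssign high low b [] n = b := rfl

theorem pvAssign_cons (high low : Int) (b : List (Option Int)) (i : Nat) (d : List Nat) (n : Nat) :
    pvAssign high low b (i :: d) n =
      pvAssign high low (b.set i (some (if n % 2 = 1 then low else high))) d (n / 2) := rfl

theorem pvAssign_append (high low : Int) (b : List (Option Int)) (d : List Nat) (i : Nat) (n : Nat) :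
    pvAssign high low b (d ++ [i]) n =
      (pvAssign high low b d n).set i (some (if (n / 2 ^ d.length) % 2 = 1 then low else high)) := by
  induction d generalizing b n with
  | nil => simp [pvAssign_nil, pvAssign_cons]
  | cons j d ih =>
      rw [List.cons_append, pvAssign_cons, pvAssign_cons, ih]
      congr 2
      rw [Nat.div_div_eq_div_mul, List.length_cons, pow_succ, mul_comm 2]

theorem pvAssign_set_comm (high low : Int) (b : List (Option Int)) (d : List Nat) (i : Nat)
    (v : Option Int) (n : Nat) (hi : i ∉ d) :
    pvAssign high low (b.set i v) d n = (pvAssign high low b d n).set i v := by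
  induction d generalizing b n with
  | nil => simp [pvAssign_nil]
  | cons j d ih =>
      simp only [List.mem_cons, not_or] at hi
      rw [pvAssign_cons, pvAssign_cons, List.set_comm _ _ (hi.1), ih _ _ hi.2]

theorem pvAssign_add_pow (high low : Int) (b : List (Option Int)) (d : List Nat) (m c : Nat) :
    pvAssign high low b d (m + c * 2 ^ d.length) = pvAssign high low b d m := by
  induction d generalizing b m c with
  | nil => simp [pvAssign_nil]
  | cons j d ih =>
      rw [pvAssign_cons, pvAssign_cons]
      have h2 : m + c * 2 ^ (j :: d).length = m + 2 * (c * 2 ^ d.length) := by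
        simp [List.length_cons, pow_succ]; ring
      rw [h2]
      have hm : (m + 2 * (c * 2 ^ d.length)) % 2 = m % 2 := by omega
      have hd : (m + 2 * (c * 2 ^ d.length)) / 2 = m / 2 + c * 2 ^ d.length := by omega
      rw [hm, hd, ih]

-- A's recursion equals B's binary-count map, for distinct index lists
theorem magnetization_recurse_eq (high low : Int) (d : List Nat) (b : List (Option Int))
    (hnd : d.Nodup) :
    magnetization_recurse b d high low =
      (List.range (2 ^ d.length)).map (fun n => pvAssign high low b d n) := by
  induction d using List.reverseRecOn generalizing b with
  | nil => simp [magnetization_recurse, pvAssign_nil]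
  | append_singleton d i ih =>
      have hne : d ++ [i] ≠ [] := by simp
      have hc : (d.concat i).Nodup := by simpa [List.concat_eq_append] using hnd
      have hnd' : d.Nodup := ((List.nodup_concat d i).mp hc).2
      have hmem : i ∉ d := ((List.nodup_concat d i).mp hc).1
      rw [magnetization_recurse, dif_neg hne]
      simp only [List.getLast_concat, List.dropLast_concat]
      rw [ih _ hnd', List.set_set, ih _ hnd']
      have hlen : (d ++ [i]).length = d.length + 1 := by simp
      rw [hlen, pow_succ, Nat.mul_two, List.range_add, List.map_append, List.map_map]
      congr 1
      · apply List.map_congr_left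
        intro n hn
        rw [List.mem_range] at hn
        rw [pvAssign_set_comm _ _ _ _ _ _ _ hmem, pvAssign_append, Nat.div_eq_of_lt hn]
        norm_num
      · apply List.map_congr_left
        intro n hn
        rw [List.mem_range] at hn
        simp only [Function.comp]
        rw [pvAssign_set_comm _ _ _ _ _ _ _ hmem, Nat.add_comm, pvAssign_append]
        have h1 : (n + 2 ^ d.length) / 2 ^ d.length = 1 := by
          rw [Nat.add_div_right _ (Nat.two_pow_pos _), Nat.div_eq_of_lt hn]
        have h2 : pvAssign high low b d (n + 2 ^ d.length) = pvAssign high low b d n := by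
          simpa using pvAssign_add_pow high low b d n 1
        rw [h1, h2]
        norm_num

-- the fold's dualmags component lists exactly the indices whose ion satisfies the predicate
theorem fold_snd_eq (f : String → Bool) (high low : Int) (l : List (String × Nat))
    (acc : List (Option Int) × List Nat) :
    (l.foldl
      (fun (acc : List (Option Int) × List Nat) p =>
        if f p.1 then (acc.1 ++ [none], acc.2 ++ [p.2])
        else if pvMagions.contains p.1 then (acc.1 ++ [some high], acc.2)
        else (acc.1 ++ [some low], acc.2))
      acc).2 = acc.2 ++ (l.filter (fun p => f p.1)).map Prod.snd := by
  induction l generalizing acc with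
  | nil => simp
  | cons p l ih =>
      rw [List.foldl_cons]
      by_cases h : f p.1
      · rw [if_pos h, ih, List.filter_cons, if_pos (by simpa using h)]
        simp
      · rw [if_neg h]
        by_cases h2 : pvMagions.contains p.1
        · rw [if_pos h2, ih, List.filter_cons, if_neg (by simpa using h)]
        · rw [if_neg h2, ih, List.filter_cons, if_neg (by simpa using h)]

-- A's dict lookup, written as an if-chain over the two literal keys
theorem pvDualmag_lookup (ion k : String) :
    (match pvDualmag.get? k with | some lst => lst.contains ion | none => false)
    = (if k = "O" then (["Co"] : List String).contains ion
       else if k = "S" then (["Mn", "Fe", "Cr", "Co"] : List String).contains ion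
       else false) := by
  have hd : pvDualmag = PySem.Dict.mk [("O", ["Co"]), ("S", ["Mn", "Fe", "Cr", "Co"])] := by decide
  rw [hd]
  by_cases h1 : k = "O"
  · subst h1; rfl
  · by_cases h2 : k = "S"
    · subst h2; rfl
    · have : (PySem.Dict.mk [("O", ["Co"]), ("S", ["Mn", "Fe", "Cr", "Co"])]).get? k = none := by
        simp [PySem.Dict.get?]
        exact ⟨fun h => h1 h.symm, fun h => h2 h.symm⟩
      rw [this]
      simp [h1, h2]

theorem is_dualmagnetic_eq_contains (ion : String) (ionlist : List String) (L : List String)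
    (hiff : ∀ x, x ∈ L ↔ (("O" ∈ ionlist ∧ x ∈ (["Co"] : List String)) ∨
      ("S" ∈ ionlist ∧ x ∈ (["Mn", "Fe", "Cr", "Co"] : List String)))) :
    is_dualmagnetic ion ionlist = L.contains ion := by
  rw [Bool.eq_iff_iff, List.contains_eq_mem]
  simp only [is_dualmagnetic, List.any_eq_true, decide_eq_true_eq, hiff]
  constructor
  · rintro ⟨k, hk, hcond⟩
    rw [pvDualmag_lookup ion k] at hcond
    split_ifs at hcond with h1 h2
    · exact Or.inl ⟨h1 ▸ hk, by simpa using hcond⟩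
    · exact Or.inr ⟨h2 ▸ hk, by simpa using hcond⟩
  · rintro (⟨hO, hm⟩ | ⟨hS, hm⟩)
    · exact ⟨"O", hO, by rw [pvDualmag_lookup]; simp_all⟩
    · exact ⟨"S", hS, by rw [pvDualmag_lookup]; simp [hm]⟩

-- the active set built by B recognises exactly the ions A's is_dualmagnetic accepts
theorem active_contains_eq (ion : String) (ionlist : List String) :
    is_dualmagnetic ion ionlist =
      (pvDualmag.items.foldl
        (fun (s : PySem.Set String) kv =>
          if ionlist.contains kv.1 then kv.2.foldl PySem.Set.add s else s)
        ([] : PySem.Set String)).contains ion := by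
  have h : pvDualmag.items = [("O", ["Co"]), ("S", ["Mn", "Fe", "Cr", "Co"])] := by decide
  rw [h]
  by_cases hO : "O" ∈ ionlist <;> by_cases hS : "S" ∈ ionlist
  · rw [show (List.foldl (fun (s : PySem.Set String) kv => if ionlist.contains kv.1 then kv.2.foldl PySem.Set.add s else s) ([] : PySem.Set String) [("O", ["Co"]), ("S", ["Mn", "Fe", "Cr", "Co"])]) = ["Co", "Mn", "Fe", "Cr"] from by simp [List.contains_eq_mem, hO, hS, PySem.Set.add]]
    exact is_dualmagnetic_eq_contains ion ionlist _ (fun x => by simp [hO, hS]; tauto)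
  · rw [show (List.foldl (fun (s : PySem.Set String) kv => if ionlist.contains kv.1 then kv.2.foldl PySem.Set.add s else s) ([] : PySem.Set String) [("O", ["Co"]), ("S", ["Mn", "Fe", "Cr", "Co"])]) = ["Co"] from by simp [List.contains_eq_mem, hO, hS, PySem.Set.add]]
    exact is_dualmagnetic_eq_contains ion ionlist _ (fun x => by simp [hO, hS])
  · rw [show (List.foldl (fun (s : PySem.Set String) kv => if ionlist.contains kv.1 then kv.2.foldl PySem.Set.add s else s) ([] : PySem.Set String) [("O", ["Co"]), ("S", ["Mn", "Fe", "Cr", "Co"])]) = ["Mn", "Fe", "Cr", "Co"] from by simp [List.contains_eq_mem, hO, hS, PySem.Set.add]]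
    exact is_dualmagnetic_eq_contains ion ionlist _ (fun x => by simp [hO, hS])
  · rw [show (List.foldl (fun (s : PySem.Set String) kv => if ionlist.contains kv.1 then kv.2.foldl PySem.Set.add s else s) ([] : PySem.Set String) [("O", ["Co"]), ("S", ["Mn", "Fe", "Cr", "Co"])]) = [] from by simp [List.contains_eq_mem, hO, hS]]
    exact is_dualmagnetic_eq_contains ion ionlist _ (fun x => by simp [hO, hS])

-- ===== VERDICT (by name: the statement is the Claim_ definition above) =====
theorem get_magnetizations_spec : Claim_equal_get_magnetizations := by
  intro ionlist high low _
  unfold Spec_get_magnetizations get_magnetizations get_magnetizations_alt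
  have hfold :
      (ionlist.zipIdx).foldl
        (fun (acc : List (Option Int) × List Nat) p =>
          if is_dualmagnetic p.1 ionlist then (acc.1 ++ [none], acc.2 ++ [p.2])
          else if pvMagions.contains p.1 then (acc.1 ++ [some high], acc.2)
          else (acc.1 ++ [some low], acc.2))
        ([], []) =
      (ionlist.zipIdx).foldl
        (fun (acc : List (Option Int) × List Nat) p =>
          if (pvDualmag.items.foldl
              (fun (s : PySem.Set String) kv =>
                if ionlist.contains kv.1 then kv.2.foldl PySem.Set.add s else s)
              ([] : PySem.Set String)).contains p.1 then (acc.1 ++ [none], acc.2 ++ [p.2])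
          else if pvMagions.contains p.1 then (acc.1 ++ [some high], acc.2)
          else (acc.1 ++ [some low], acc.2))
        ([], []) := by
    apply List.foldl_ext
    intro acc p _
    rw [active_contains_eq p.1 ionlist]
  rw [hfold]
  have hnd : ((ionlist.zipIdx).foldl
        (fun (acc : List (Option Int) × List Nat) p =>
          if (pvDualmag.items.foldl
              (fun (s : PySem.Set String) kv =>
                if ionlist.contains kv.1 then kv.2.foldl PySem.Set.add s else s)
              ([] : PySem.Set String)).contains p.1 then (acc.1 ++ [none], acc.2 ++ [p.2])
          else if pvMagions.contains p.1 then (acc.1 ++ [some high], acc.2)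
          else (acc.1 ++ [some low], acc.2))
        ([], [])).2.Nodup := by
    rw [fold_snd_eq]
    simp only [List.nil_append]
    apply List.Sublist.nodup (l₂ := (ionlist.zipIdx).map Prod.snd)
    · exact List.Sublist.map Prod.snd List.filter_sublist
    · rw [List.zipIdx_map_snd]
      exact List.nodup_range'
  rw [magnetization_recurse_eq _ _ _ _ hnd]
  rfl
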